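-- pv_equiv track=rewrite | github.com/eternalstop/confusion | prac_problem/day06.py | result
-- ===== SOURCE A (Python) =====
-- def result(year, day):
-- 	for i in range(2011, year):
-- 		if year == 2011:
-- 			break
-- 		if judge_year(i):
-- 			day += 366
-- 		else:
-- 			day += 365
-- 	if 0 < day % 5 < 4:
-- 		return 1
-- 	else:
-- 		return 0
--
-- def judge_year(y):
-- 	if (y % 4 == 0) & (y % 400 != 0) | (y % 400 == 0):
-- 		return 1
-- 	else:
-- 		return 0
-- ===== SOURCE B (Python) =====
-- def result(year, day):
--     n = year - 2011
--     if n > 0: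
--         day += 365 * n + ((year - 1) // 4 - 2010 // 4)
--     return 1 if 0 < day % 5 < 4 else 0
-- ===== Notes on version B (the rewrite author's own statement) =====
-- stated objective: faster
-- what changed: Replaces the per-year loop (adding 365/366 per year via judge_year, which reduces to y % 4 == 0) with a closed-form formula: 365*(year-2011) plus the count of multiples of 4 in [2011, year) computed by floor division.
import Mathlib
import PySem

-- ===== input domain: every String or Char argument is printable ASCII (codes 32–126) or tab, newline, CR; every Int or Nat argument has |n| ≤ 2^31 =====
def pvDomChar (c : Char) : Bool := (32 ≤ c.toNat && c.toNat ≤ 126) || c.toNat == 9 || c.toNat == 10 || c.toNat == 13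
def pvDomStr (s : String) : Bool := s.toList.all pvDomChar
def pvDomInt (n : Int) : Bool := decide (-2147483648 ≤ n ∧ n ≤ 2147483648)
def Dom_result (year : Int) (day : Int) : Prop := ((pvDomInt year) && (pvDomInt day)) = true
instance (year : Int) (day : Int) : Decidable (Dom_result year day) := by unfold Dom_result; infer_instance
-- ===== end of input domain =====

-- B replaces A's per-year loop by a closed-form count (365 per year plus the number of
-- multiples of 4 in the range, matching A's judge_year, which reduces to y % 4 == 0);
-- objective: faster (O(1) instead of O(year)).

-- ===== PORT A =====
def judge_year (y : Int) : Int :=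
  -- Python '&'/'|' on the comparison bools, '&' binds tighter than '|'
  if ((PySem.Int.mod y 4 == 0) && (PySem.Int.mod y 400 != 0)) || (PySem.Int.mod y 400 == 0) then 1 else 0

-- the for-loop with its 'break' (which fires before any accumulation when year == 2011)
def resultLoop (year : Int) : List Int → Int → Int
  | [], day => day
  | i :: rest, day =>
      if year == 2011 then day
      else resultLoop year rest (if judge_year i ≠ 0 then day + 366 else day + 365)

def result (year : Int) (day : Int) : Int :=
  let day := resultLoop year (PySem.List.pyRange 2011 year 1) day
  if 0 < PySem.Int.mod day 5 ∧ PySem.Int.mod day 5 < 4 then 1 else 0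

-- ===== PORT B =====
def result_alt (year : Int) (day : Int) : Int :=
  let n := year - 2011
  let day := if n > 0 then day + 365 * n + (PySem.Int.floordiv (year - 1) 4 - PySem.Int.floordiv 2010 4) else day
  if 0 < PySem.Int.mod day 5 ∧ PySem.Int.mod day 5 < 4 then 1 else 0

-- ===== PRECONDITION & SPEC =====
def Spec_result (year : Int) (day : Int) (out : Int) : Prop := out = result_alt year day
instance (year : Int) (day : Int) (out : Int) : Decidable (Spec_result year day out) := by unfold Spec_result; infer_instance

-- ===== CLAIM (what is proved, stated in full; the proofs are below) =====
def Claim_equal_result : Prop := ∀ (year : Int) (day : Int), Dom_result year day → Spec_result year day (result year day)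

-- ===== LEMMAS AND PROOFS =====

-- judge_year fires exactly on multiples of 4
theorem judge_year_eq (y : Int) : judge_year y = if PySem.Int.mod y 4 = 0 then 1 else 0 := by
  unfold judge_year
  have h4 : PySem.Int.mod y 4 = y % 4 := PySem.Int.mod_eq_emod_of_pos (by norm_num)
  have h400 : PySem.Int.mod y 400 = y % 400 := PySem.Int.mod_eq_emod_of_pos (by norm_num)
  rw [h4, h400]
  by_cases h : y % 4 = 0 <;> [simp [h]; (simp [h]; omega)]

-- when year ≠ 2011 the break never fires and the loop is a plain fold
theorem resultLoop_eq_foldl (year : Int) (hy : year ≠ 2011) (l : List Int) (day : Int) :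
    resultLoop year l day
      = l.foldl (fun d i => if judge_year i ≠ 0 then d + 366 else d + 365) day := by
  induction l generalizing day with
  | nil => rfl
  | cons a rest ih =>
      have hb : (year == 2011) = false := by simpa using hy
      simp only [resultLoop, hb, List.foldl]
      exact ih _

-- closed form of the accumulation over pyRange 2011 y
theorem foldl_days_closed (y : Int) (h : 2011 ≤ y) (day : Int) :
    (PySem.List.pyRange 2011 y 1).foldl (fun d i => if judge_year i ≠ 0 then d + 366 else d + 365) day
      = day + 365 * (y - 2011) + ((y - 1) / 4 - 502) := by
  obtain ⟨n, hn⟩ : ∃ n : Nat, y = 2011 + n := ⟨(y - 2011).toNat, by omega⟩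
  subst hn
  induction n with
  | zero => rw [PySem.List.pyRange_one_eq_nil (by omega)]; simp
  | succ k ih =>
      have hsp : (2011 : Int) + (↑(k+1) : Int) = (2011 + ↑k) + 1 := by push_cast; ring
      rw [hsp, PySem.List.pyRange_one_succ_right (by omega), List.foldl_append]
      rw [ih (by omega)]
      simp only [List.foldl, judge_year_eq]
      have hm : PySem.Int.mod (2011 + (k:Int)) 4 = (2011 + (k:Int)) % 4 :=
        PySem.Int.mod_eq_emod_of_pos (by norm_num)
      rw [hm]
      by_cases hd : (2011 + (k:Int)) % 4 = 0 <;> simp only [hd, if_pos] <;> push_cast <;> omega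

-- ===== VERDICT (by name: the statement is the Claim_ definition above) =====
theorem result_spec : Claim_equal_result := by
  intro year day _
  unfold Spec_result
  simp only [result, result_alt]
  by_cases h : 2011 < year
  · rw [resultLoop_eq_foldl _ (by omega), foldl_days_closed _ (by omega),
        if_pos (show year - 2011 > 0 by omega),
        PySem.Int.floordiv_eq_ediv_of_pos (show (0:Int) < 4 by norm_num),
        show PySem.Int.floordiv (2010:Int) 4 = 502 from by decide]
  · rw [PySem.List.pyRange_one_eq_nil (by omega),
        if_neg (show ¬ (year - 2011 > 0) by omega)]
    rfl
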